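-- pv_equiv track=rewrite | github.com/Matt740/School | Python Projects ESC180/Project2_Gomoku_Bot.py | detect_rows_diagonal_right_top_is_win
-- ===== SOURCE A (Python) =====
-- def is_bounded_start(board, y_end, x_end, length, d_y, d_x): # Helper function for is_bounded
--     '''returns True if the sequence of length length that ends at location (y_end, x_end) is bounded at the end opposite of (y_end, x_end)'''
--     if y_end - length*d_y > 7 or y_end - length*d_y < 0:
--         return True
--     elif x_end - length*d_x > 7 or x_end - length*d_x < 0:
--         return True
--     elif board[y_end - length*d_y][x_end - length*d_x] != ' ':
--         return True
--     return False
--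
-- def is_bounded_end(board, y_end, x_end, length, d_y, d_x): # Helper function for is_bounded
--     '''returns True if the sequence of length length that ends at location (y_end, x_end) is bounded at the end (y_end, x_end)'''
--     if y_end + d_y > 7 or y_end + d_y < 0:
--         return True
--     elif x_end + d_x > 7 or x_end + d_x < 0:
--         return True
--     elif board[y_end + d_y][x_end + d_x] != ' ':
--         return True
--     return False
--
-- def is_bounded(board, y_end, x_end, length, d_y, d_x):
--     '''analyses the sequence of length length that ends at location (y_end, x_end). The function returns "OPEN" if the sequence is open, "SEMIOPEN" if the sequence if semi-open, and "CLOSED" if the sequence is closed.'''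
--     if is_bounded_start(board, y_end, x_end, length, d_y, d_x) == True and is_bounded_end(board, y_end, x_end, length, d_y, d_x) == True:
--         return "CLOSED"
--     elif is_bounded_start(board, y_end, x_end, length, d_y, d_x) == True and is_bounded_end(board, y_end, x_end, length, d_y, d_x) == False:
--         return "SEMIOPEN"
--     elif is_bounded_start(board, y_end, x_end, length, d_y, d_x) == False and is_bounded_end(board, y_end, x_end, length, d_y, d_x) == True:
--         return "SEMIOPEN"
--     elif is_bounded_start(board, y_end, x_end, length, d_y, d_x) == False and is_bounded_end(board, y_end, x_end, length, d_y, d_x) == False: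
--         return "OPEN"
--
-- def detect_row_is_win(board, col, y_start, x_start, length, d_y, d_x):
--     open_seq_count = 0
--     semi_open_seq_count = 0
--     closed_seq_count = 0
--     counter = 0
--     while 0 <= y_start + (length-1)*d_y <= 7 and 0 <= x_start + (length-1)*d_x <= 7:
--         for i in range(length):
--             if board[y_start + i*d_y][x_start + i*d_x] == col:
--                 counter += 1
--         if counter == length:
--             if is_bounded(board, y_start, x_start, length, -d_y, -d_x) == "SEMIOPEN":
--                 semi_open_seq_count += 1
--             elif is_bounded(board, y_start, x_start, length, -d_y, -d_x) == "OPEN":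
--                 open_seq_count += 1
--             elif is_bounded(board, y_start, x_start, length, -d_y, -d_x) == "CLOSED":
--                 closed_seq_count += 1
--         y_start += d_y
--         x_start += d_x
--         counter = 0
--     return open_seq_count, semi_open_seq_count, closed_seq_count
--
-- def detect_rows_diagonal_right_top_is_win(board, col, length):
--     open_seq_count = 0
--     semi_open_seq_count = 0
--     closed_seq_count = 0
--     x_diagonal_start = 6
--     res = ()
--     for i in range(1, 9):
--         res += detect_row_is_win(board, col, 0, x_diagonal_start, length, 1, -1)
--         x_diagonal_start = 6
--         x_diagonal_start -= i
--     for j in range(1, len(res), 3):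
--         semi_open_seq_count += res[j]
--     for k in range(0, len(res), 3):
--         open_seq_count += res[k]
--     for h in range(2, len(res), 3):
--         closed_seq_count += res[h]
--     return open_seq_count, semi_open_seq_count, closed_seq_count
-- ===== SOURCE B (Python) =====
-- def _blocked(board, y, x):
--     # an end cell is blocking if it lies off the 8x8 board or is not blank
--     return not (0 <= y <= 7 and 0 <= x <= 7) or board[y][x] != ' '
--
-- def _run_counts(board, col, x0, end_i, run, length):
--     # counts contributed by the maximal run of `col` occupying diagonal
--     # positions end_i-run .. end_i-1 of the anti-diagonal starting at (0, x0)
--     if run < length: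
--         return (0, 0, 0)
--     counts = [0, 0, 0]
--     before = _blocked(board, end_i - run - 1, x0 - (end_i - run - 1))
--     after = _blocked(board, end_i, x0 - end_i)
--     inner = col != ' '
--     if run == length:
--         counts[before + after] += 1
--     else:
--         counts[before + inner] += 1
--         counts[inner + after] += 1
--         counts[2 * inner] += run - length - 1
--     return (counts[0], counts[1], counts[2])
--
-- def detect_rows_diagonal_right_top_is_win(board, col, length):
--     if length < 1 or length > 7:
--         # no window of that length fits: the longest of these diagonals has 7 cells
--         return 0, 0, 0
--     open_seq_count = semi_open_seq_count = closed_seq_count = 0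
--     for x0 in range(6, -2, -1):
--         run = 0
--         for i in range(x0 + 1):
--             if board[i][x0 - i] == col:
--                 run += 1
--             else:
--                 o, s, c = _run_counts(board, col, x0, i, run, length)
--                 open_seq_count += o; semi_open_seq_count += s; closed_seq_count += c
--                 run = 0
--         o, s, c = _run_counts(board, col, x0, x0 + 1, run, length)
--         open_seq_count += o; semi_open_seq_count += s; closed_seq_count += c
--     return open_seq_count, semi_open_seq_count, closed_seq_count
-- ===== Notes on version B (the rewrite author's own statement) =====
-- stated objective: alternative
-- what changed: B run-length-encodes each anti-diagonal in a single cell scan and adds a closed-form count triple per maximal run of col (edge windows classified by the run's two boundary cells, interior windows counted arithmetically from the run length), instead of A's sliding per-window cell-counting with OPEN/SEMIOPEN/CLOSED string classification, flat 24-tuple and three strided summation loops.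
import Mathlib
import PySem

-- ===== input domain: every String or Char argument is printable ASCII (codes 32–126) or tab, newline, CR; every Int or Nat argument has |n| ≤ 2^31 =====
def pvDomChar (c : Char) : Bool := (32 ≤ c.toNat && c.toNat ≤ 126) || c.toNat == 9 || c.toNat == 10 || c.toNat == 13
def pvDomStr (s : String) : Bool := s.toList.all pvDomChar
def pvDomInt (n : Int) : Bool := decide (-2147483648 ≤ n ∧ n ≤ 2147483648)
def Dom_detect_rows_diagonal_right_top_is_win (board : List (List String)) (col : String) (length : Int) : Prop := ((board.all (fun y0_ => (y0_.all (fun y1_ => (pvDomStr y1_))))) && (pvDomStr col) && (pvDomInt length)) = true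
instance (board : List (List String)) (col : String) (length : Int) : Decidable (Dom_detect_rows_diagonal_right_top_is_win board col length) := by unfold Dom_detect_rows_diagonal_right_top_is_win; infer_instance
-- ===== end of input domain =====

-- B replaces A's per-window sliding scan (test every length-window cell by cell, classify it by
-- the OPEN/SEMIOPEN/CLOSED string helpers, collect a flat tuple and re-sum it in three strided
-- loops) by a single run-length scan of each anti-diagonal: each maximal run of `col` cells
-- contributes a closed-form triple of counts (objective: alternative — per-run O(1) arithmetic
-- instead of per-window re-scanning).

-- ===== PORT A =====
-- board[y][x]; every access A performs has 0 ≤ y,x ≤ 7, and Pre_ guarantees those cells exist,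
-- so the .getD defaults are never reached on admitted inputs.
def pvCell (board : List (List String)) (y x : Int) : String :=
  (PySem.List.pyGet? ((PySem.List.pyGet? board y).getD []) x).getD ""

def is_bounded_start (board : List (List String)) (y_end x_end length d_y d_x : Int) : Bool :=
  if y_end - length*d_y > 7 ∨ y_end - length*d_y < 0 then true
  else if x_end - length*d_x > 7 ∨ x_end - length*d_x < 0 then true
  else if pvCell board (y_end - length*d_y) (x_end - length*d_x) ≠ " " then true
  else false

def is_bounded_end (board : List (List String)) (y_end x_end length d_y d_x : Int) : Bool :=
  if y_end + d_y > 7 ∨ y_end + d_y < 0 then true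
  else if x_end + d_x > 7 ∨ x_end + d_x < 0 then true
  else if pvCell board (y_end + d_y) (x_end + d_x) ≠ " " then true
  else false

def is_bounded (board : List (List String)) (y_end x_end length d_y d_x : Int) : String :=
  if is_bounded_start board y_end x_end length d_y d_x = true ∧ is_bounded_end board y_end x_end length d_y d_x = true then "CLOSED"
  else if is_bounded_start board y_end x_end length d_y d_x = true ∧ is_bounded_end board y_end x_end length d_y d_x = false then "SEMIOPEN"
  else if is_bounded_start board y_end x_end length d_y d_x = false ∧ is_bounded_end board y_end x_end length d_y d_x = true then "SEMIOPEN"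
  else if is_bounded_start board y_end x_end length d_y d_x = false ∧ is_bounded_end board y_end x_end length d_y d_x = false then "OPEN"
  else ""   -- Python's implicit None: unreachable (the four cases are exhaustive)

-- A's while loop, with a fuel bound.  The entry point only calls it with y_start = 0, d_y = 1,
-- where the guard forces y_start + (length-1) ≤ 7, so at most 8 iterations run: fuel 9 is exact there.
def pvDrwLoop (board : List (List String)) (col : String) (length d_y d_x : Int)
    (y x o s c : Int) : Nat → Int × Int × Int
  | 0 => (o, s, c)
  | fuel+1 =>
    if 0 ≤ y + (length-1)*d_y ∧ y + (length-1)*d_y ≤ 7 ∧ 0 ≤ x + (length-1)*d_x ∧ x + (length-1)*d_x ≤ 7 then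
      let counter : Int := (PySem.List.pyRange 0 length 1).foldl
        (fun acc i => if pvCell board (y + i*d_y) (x + i*d_x) = col then acc + 1 else acc) 0
      let osc : Int × Int × Int :=
        if counter = length then
          if is_bounded board y x length (-d_y) (-d_x) = "SEMIOPEN" then (o, s+1, c)
          else if is_bounded board y x length (-d_y) (-d_x) = "OPEN" then (o+1, s, c)
          else if is_bounded board y x length (-d_y) (-d_x) = "CLOSED" then (o, s, c+1)
          else (o, s, c)
        else (o, s, c)
      pvDrwLoop board col length d_y d_x (y + d_y) (x + d_x) osc.1 osc.2.1 osc.2.2 fuel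
    else (o, s, c)

def detect_row_is_win (board : List (List String)) (col : String) (y_start x_start length d_y d_x : Int) : Int × Int × Int :=
  pvDrwLoop board col length d_y d_x y_start x_start 0 0 0 9

def detect_rows_diagonal_right_top_is_win (board : List (List String)) (col : String) (length : Int) : Int × Int × Int :=
  let st := (PySem.List.pyRange 1 9 1).foldl
    (fun (st : Int × List Int) i =>
      let t := detect_row_is_win board col 0 st.1 length 1 (-1)
      (6 - i, st.2 ++ [t.1, t.2.1, t.2.2])) ((6 : Int), ([] : List Int))
  let res := st.2
  let semi := (PySem.List.pyRange 1 (res.length : Int) 3).foldl (fun acc j => acc + (PySem.List.pyGet? res j).getD 0) 0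
  let opn  := (PySem.List.pyRange 0 (res.length : Int) 3).foldl (fun acc k => acc + (PySem.List.pyGet? res k).getD 0) 0
  let cls  := (PySem.List.pyRange 2 (res.length : Int) 3).foldl (fun acc h => acc + (PySem.List.pyGet? res h).getD 0) 0
  (opn, semi, cls)

-- ===== PORT B =====
def pvBlocked (board : List (List String)) (y x : Int) : Bool :=
  !(decide (0 ≤ y ∧ y ≤ 7 ∧ 0 ≤ x ∧ x ≤ 7)) || decide (pvCell board y x ≠ " ")

def add3 (a b : Int × Int × Int) : Int × Int × Int := (a.1 + b.1, a.2.1 + b.2.1, a.2.2 + b.2.2)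

-- counts[n] += k on the three-component counts list
def pvBumpN (t : Int × Int × Int) (n k : Int) : Int × Int × Int :=
  if n = 0 then (t.1 + k, t.2.1, t.2.2)
  else if n = 1 then (t.1, t.2.1 + k, t.2.2)
  else (t.1, t.2.1, t.2.2 + k)

def pvBump (t : Int × Int × Int) (n : Int) : Int × Int × Int := pvBumpN t n 1

-- _run_counts of Source B
def pvRunCounts (board : List (List String)) (col : String) (x0 end_i run length : Int) : Int × Int × Int :=
  if run < length then (0, 0, 0)
  else
    let before : Int := if pvBlocked board (end_i - run - 1) (x0 - (end_i - run - 1)) then 1 else 0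
    let after : Int := if pvBlocked board end_i (x0 - end_i) then 1 else 0
    let inner : Int := if col ≠ " " then 1 else 0
    if run = length then pvBump (0, 0, 0) (before + after)
    else pvBumpN (pvBump (pvBump (0, 0, 0) (before + inner)) (inner + after)) (2 * inner) (run - length - 1)

-- the body of Source B's outer loop: scan one anti-diagonal, accumulating run lengths
def pvBDiag (board : List (List String)) (col : String) (length x0 : Int) (t : Int × Int × Int) : Int × Int × Int :=
  let inner := (PySem.List.pyRange 0 (x0+1) 1).foldl
    (fun (st : Int × (Int × Int × Int)) i =>
      if pvCell board i (x0 - i) = col then (st.1 + 1, st.2)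
      else (0, add3 st.2 (pvRunCounts board col x0 i st.1 length))) (0, t)
  add3 inner.2 (pvRunCounts board col x0 (x0+1) inner.1 length)

def detect_rows_diagonal_right_top_is_win_alt (board : List (List String)) (col : String) (length : Int) : Int × Int × Int :=
  if length < 1 ∨ 7 < length then (0, 0, 0)
  else (PySem.List.pyRange 6 (-2) (-1)).foldl
    (fun t x0 => pvBDiag board col length x0 t) (0, 0, 0)

-- ===== PRECONDITION & SPEC =====
-- Pre_ requires the standard 8×8 Gomoku board whenever 1 ≤ length ≤ 7 (the only lengths for which
-- A reads any cell; A raises IndexError on most smaller boards then).  This also excludes some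
-- partial boards on which A's reads happen to land in range and it returns.
def Pre_detect_rows_diagonal_right_top_is_win (board : List (List String)) (col : String) (length : Int) : Prop :=
  (1 ≤ length ∧ length ≤ 7) → (8 ≤ board.length ∧ ∀ r ∈ board.take 8, 8 ≤ r.length)
instance (board : List (List String)) (col : String) (length : Int) : Decidable (Pre_detect_rows_diagonal_right_top_is_win board col length) := by unfold Pre_detect_rows_diagonal_right_top_is_win; infer_instance

def pvWitness_detect_rows_diagonal_right_top_is_win : List (List String) × String × Int :=
  ([[" ", " ", " ", " ", " ", " ", " ", " "],
    [" ", " ", " ", " ", " ", "x", " ", " "],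
    [" ", " ", " ", " ", "x", " ", " ", " "],
    [" ", " ", " ", "x", " ", " ", " ", " "],
    [" ", " ", " ", " ", " ", " ", " ", " "],
    [" ", " ", " ", " ", " ", " ", " ", " "],
    [" ", " ", " ", " ", " ", " ", " ", " "],
    [" ", " ", " ", " ", " ", " ", " ", " "]], "x", 3)

def Spec_detect_rows_diagonal_right_top_is_win (board : List (List String)) (col : String) (length : Int) (out : Int × Int × Int) : Prop := out = detect_rows_diagonal_right_top_is_win_alt board col length
instance (board : List (List String)) (col : String) (length : Int) (out : Int × Int × Int) : Decidable (Spec_detect_rows_diagonal_right_top_is_win board col length out) := by unfold Spec_detect_rows_diagonal_right_top_is_win; infer_instance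

-- ===== CLAIM (what is proved, stated in full; the proofs are below) =====
def Claim_equal_detect_rows_diagonal_right_top_is_win : Prop := ∀ (board : List (List String)) (col : String) (length : Int), Dom_detect_rows_diagonal_right_top_is_win board col length → Pre_detect_rows_diagonal_right_top_is_win board col length → Spec_detect_rows_diagonal_right_top_is_win board col length (detect_rows_diagonal_right_top_is_win board col length)

-- ===== LEMMAS AND PROOFS =====

-- the contribution of the window of diagonal positions y..y+L-1 on the anti-diagonal through (0, x0)
def pvContrib (board : List (List String)) (col : String) (x0 L y : Int) : Int × Int × Int :=
  if (PySem.List.pyRange 0 L 1).all (fun i => pvCell board (y+i) (x0-(y+i)) == col) then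
    pvBump (0, 0, 0) ((if pvBlocked board (y-1) (x0-(y-1)) then 1 else 0)
                    + (if pvBlocked board (y+L) (x0-(y+L)) then 1 else 0))
  else (0, 0, 0)

def wsum (board : List (List String)) (col : String) (x0 L a b : Int) : Int × Int × Int :=
  ((PySem.List.pyRange a b 1).map (pvContrib board col x0 L)).sum

theorem add3_eq (a b : Int × Int × Int) : add3 a b = a + b := rfl

theorem zero3 : ((0, 0, 0) : Int × Int × Int) = 0 := rfl

theorem counter_iff (P : Int → Prop) [DecidablePred P] (l : List Int) (L : Int)
    (hL : (l.length : Int) = L) :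
    (l.foldl (fun acc i => if P i then acc + 1 else acc) 0 = L) ↔ ∀ i ∈ l, P i := by
  rw [show (fun (acc : Int) i => if P i then acc + 1 else acc)
        = (fun (acc : Int) i => if (fun i => decide (P i)) i = true then acc + 1 else acc) from by
      funext acc i; split_ifs <;> simp_all,
    PySem.List.foldl_count_if]
  rw [← hL]
  constructor
  · intro h i hi
    have hle : l.countP (fun i => decide (P i)) = l.length := by omega
    have := List.countP_eq_length.mp hle i hi
    simpa using this
  · intro h
    have : l.countP (fun i => decide (P i)) = l.length :=
      List.countP_eq_length.mpr (fun a ha => by simpa using h a ha)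
    omega

theorem blocked_iff (board : List (List String)) (Y X : Int) :
    (if Y > 7 ∨ Y < 0 then true
     else if X > 7 ∨ X < 0 then true
     else if pvCell board Y X ≠ " " then true else false) = pvBlocked board Y X := by
  by_cases h1 : Y > 7 ∨ Y < 0
  · have h : ¬(0 ≤ Y ∧ Y ≤ 7 ∧ 0 ≤ X ∧ X ≤ 7) := by omega
    simp [pvBlocked, h1, h]
  · by_cases h2 : X > 7 ∨ X < 0
    · have h : ¬(0 ≤ Y ∧ Y ≤ 7 ∧ 0 ≤ X ∧ X ≤ 7) := by omega
      simp [pvBlocked, h1, h2, h]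
    · have h3 : 0 ≤ Y ∧ Y ≤ 7 ∧ 0 ≤ X ∧ X ≤ 7 := by omega
      by_cases hc : pvCell board Y X = " " <;> simp [pvBlocked, h1, h2, h3, hc]

theorem isbs_eq (board : List (List String)) (y x length : Int) :
    is_bounded_start board y x length (-1) 1 = pvBlocked board (y + length) (x - length) := by
  simp only [is_bounded_start, show y - length * (-1) = y + length from by ring,
    show x - length * 1 = x - length from by ring]
  exact blocked_iff board (y + length) (x - length)

theorem isbe_eq (board : List (List String)) (y x length : Int) :
    is_bounded_end (board : List (List String)) y x length (-1) 1 = pvBlocked board (y - 1) (x + 1) := by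
  simp only [is_bounded_end, show y + (-1) = y - 1 from by ring]
  exact blocked_iff board (y - 1) (x + 1)

-- a matched cell at an on-board diagonal position is blocking iff col itself is non-blank
theorem match_blk (board : List (List String)) (col : String) (x0 p : Int)
    (h0 : 0 ≤ p) (h1 : p ≤ x0) (h2 : x0 ≤ 6) (hm : pvCell board p (x0 - p) = col) :
    (if pvBlocked board p (x0 - p) then (1:Int) else 0) = (if col ≠ " " then (1:Int) else 0) := by
  have hb : (0 ≤ p ∧ p ≤ 7 ∧ 0 ≤ x0 - p ∧ x0 - p ≤ 7) := by omega
  by_cases hc : col = " "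
  · simp [pvBlocked, hb, hm, hc]; omega
  · simp [pvBlocked, hb, hm, hc]

theorem wsum_empty (board : List (List String)) (col : String) (x0 L a b : Int) (h : b ≤ a) :
    wsum board col x0 L a b = (0, 0, 0) := by
  rw [wsum, PySem.List.pyRange_one_eq_nil h]; rfl

theorem wsum_zero (board : List (List String)) (col : String) (x0 L a b : Int)
    (h : ∀ y, a ≤ y → y < b → pvContrib board col x0 L y = (0, 0, 0)) :
    wsum board col x0 L a b = (0, 0, 0) := by
  rw [wsum, zero3]
  apply List.sum_eq_zero
  intro x hx
  rcases List.mem_map.mp hx with ⟨y, hy, rfl⟩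
  rcases PySem.List.mem_pyRange_one.mp hy with ⟨hy1, hy2⟩
  rw [h y hy1 hy2]; rfl

theorem wsum_split (board : List (List String)) (col : String) (x0 L a m b : Int)
    (h1 : a ≤ m) (h2 : m ≤ b) :
    wsum board col x0 L a b = wsum board col x0 L a m + wsum board col x0 L m b := by
  rw [wsum, PySem.List.pyRange_one_append a m b h1 h2, List.map_append, List.sum_append]; rfl

theorem wsum_cons (board : List (List String)) (col : String) (x0 L a b : Int) (h : a < b) :
    wsum board col x0 L a b = pvContrib board col x0 L a + wsum board col x0 L (a+1) b := by
  rw [wsum, PySem.List.pyRange_one_cons h, List.map_cons, List.sum_cons]; rfl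

-- a window that contains the non-matching diagonal position j contributes nothing
theorem contrib_zero (board : List (List String)) (col : String) (x0 L y j : Int)
    (hnm : pvCell board j (x0 - j) ≠ col) (h1 : j - L + 1 ≤ y) (h2 : y ≤ j) :
    pvContrib board col x0 L y = (0, 0, 0) := by
  rw [pvContrib, if_neg]
  intro hall
  have hmem : (j - y) ∈ PySem.List.pyRange 0 L 1 := PySem.List.mem_pyRange_one.mpr (by omega)
  have := List.all_eq_true.mp hall (j - y) hmem
  rw [show y + (j - y) = j from by ring] at this
  exact hnm (by simpa using this)

theorem runSum (board : List (List String)) (col : String) (x0 L : Int) (hL : 1 ≤ L) (hx : x0 ≤ 6) :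
    ∀ (n : Nat) (a : Int), 0 ≤ a → a + L + n ≤ x0 + 1 →
    (∀ k, a ≤ k → k < a + L + n → pvCell board k (x0 - k) = col) →
    wsum board col x0 L a (a + n + 1) = pvRunCounts board col x0 (a + L + n) (L + n) L := by
  intro n
  induction n with
  | zero =>
    intro a ha hb hrun
    simp only [Nat.cast_zero, add_zero]
    have hall : (PySem.List.pyRange 0 L 1).all (fun i => pvCell board (a + i) (x0 - (a + i)) == col) = true := by
      rw [List.all_eq_true]
      intro i hi
      rcases PySem.List.mem_pyRange_one.mp hi with ⟨h1, h2⟩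
      simpa using hrun (a + i) (by omega) (by push_cast at hb; omega)
    rw [wsum_cons board col x0 L a (a + 1) (by omega),
      wsum_empty board col x0 L (a + 1) (a + 1) le_rfl, zero3, add_zero,
      pvContrib, if_pos hall]
    simp only [pvRunCounts, if_neg (show ¬ L < L from by omega)]
    rw [show a + L - L - 1 = a - 1 from by ring, if_true]
  | succ n ih =>
    intro a ha hb hrun
    have h1 : (((n+1:Nat)):Int) = (n:Int) + 1 := by push_cast; ring
    rw [h1] at hb ⊢
    have hrun' : ∀ k, a ≤ k → k < a + L + ((n:Int)+1) → pvCell board k (x0 - k) = col := by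
      intro k hk1 hk2; exact hrun k hk1 (by omega)
    have hall : (PySem.List.pyRange 0 L 1).all (fun i => pvCell board (a + i) (x0 - (a + i)) == col) = true := by
      rw [List.all_eq_true]
      intro i hi
      rcases PySem.List.mem_pyRange_one.mp hi with ⟨hi1, hi2⟩
      simpa using hrun' (a + i) (by omega) (by omega)
    have H := ih (a + 1) (by omega) (by omega) (fun k hk1 hk2 => hrun' k (by omega) (by omega))
    rw [show a + 1 + (n:Int) + 1 = a + ((n:Int)+1) + 1 from by ring,
        show a + 1 + L + (n:Int) = a + L + ((n:Int)+1) from by ring] at H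
    rw [wsum_cons board col x0 L a (a + ((n:Int)+1) + 1) (by omega), H,
      pvContrib, if_pos hall]
    -- the matched cells a and a+L lie inside the run, so their blockedness is that of col
    have hmA : (if pvBlocked board (a + L) (x0 - (a + L)) then (1:Int) else 0) = (if col ≠ " " then (1:Int) else 0) :=
      match_blk board col x0 (a + L) (by omega) (by omega) hx (hrun' (a + L) (by omega) (by omega))
    have hmB : (if pvBlocked board a (x0 - a) then (1:Int) else 0) = (if col ≠ " " then (1:Int) else 0) :=
      match_blk board col x0 a (by omega) (by omega) hx (hrun' a (by omega) (by omega))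
    rw [hmA]
    simp only [pvRunCounts,
      if_neg (show ¬ (L + (n:Int) < L) from by omega),
      if_neg (show ¬ (L + ((n:Int)+1) < L) from by omega),
      if_neg (show ¬ (L + ((n:Int)+1) = L) from by omega)]
    rw [show a + L + ((n:Int)+1) - (L + (n:Int)) - 1 = a from by ring,
        show a + L + ((n:Int)+1) - (L + ((n:Int)+1)) - 1 = a - 1 from by ring,
        show L + ((n:Int)+1) - L - 1 = (n:Int) from by ring, hmB]
    by_cases hn0 : n = 0
    · subst hn0
      rw [if_pos (show L + ((0:Nat):Int) = L from by push_cast; ring)]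
      by_cases c1 : pvBlocked board (a - 1) (x0 - (a - 1)) = true <;>
        by_cases c2 : pvBlocked board (a + L + 1) (x0 - (a + L + 1)) = true <;>
        by_cases c3 : col = " " <;>
        simp [pvBump, pvBumpN, c1, c2, c3]
    · rw [if_neg (show ¬ (L + (n:Int) = L) from by
        intro h; apply hn0; omega)]
      rw [show L + (n:Int) - L - 1 = (n:Int) - 1 from by ring]
      by_cases c1 : pvBlocked board (a - 1) (x0 - (a - 1)) = true <;>
        by_cases c2 : pvBlocked board (a + L + ((n:Int)+1)) (x0 - (a + L + ((n:Int)+1))) = true <;>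
        by_cases c3 : col = " " <;>
        simp [pvBump, pvBumpN, c1, c2, c3, Prod.ext_iff] <;> omega

-- any run (including too-short ones) sums to its closed-form counts
theorem runSum' (board : List (List String)) (col : String) (x0 L a b : Int)
    (hL : 1 ≤ L) (hx : x0 ≤ 6) (ha : 0 ≤ a) (hab : a ≤ b) (hb : b ≤ x0 + 1)
    (hrun : ∀ k, a ≤ k → k < b → pvCell board k (x0 - k) = col) :
    wsum board col x0 L a (b - L + 1) = pvRunCounts board col x0 b (b - a) L := by
  by_cases hr : b - a < L
  · rw [wsum_empty _ _ _ _ _ _ (by omega), pvRunCounts, if_pos hr]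
  · obtain ⟨n, hn⟩ : ∃ n : Nat, b = a + L + n := ⟨(b - a - L).toNat, by omega⟩
    subst hn
    rw [show a + L + (n:Int) - L + 1 = a + n + 1 from by ring,
        show a + L + (n:Int) - a = L + n from by ring]
    exact runSum board col x0 L hL hx n a ha (by omega)
      (by intro k hk1 hk2; exact hrun k hk1 (by omega))

-- the key step: closing the run ending at non-matching position j
theorem run_close (board : List (List String)) (col : String) (x0 L j r : Int)
    (hL : 1 ≤ L) (hx : x0 ≤ 6) (hr0 : 0 ≤ r) (hjr : 0 ≤ j - r) (hj : j ≤ x0)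
    (hnm : pvCell board j (x0 - j) ≠ col)
    (hrun : ∀ k, j - r ≤ k → k < j → pvCell board k (x0 - k) = col) :
    wsum board col x0 L (j - r) (x0 - L + 2)
      = pvRunCounts board col x0 j r L + wsum board col x0 L (j + 1) (x0 - L + 2) := by
  by_cases hrL : r < L
  · rw [pvRunCounts, if_pos hrL, zero3, zero_add]
    by_cases hje : j + 1 ≤ x0 - L + 2
    · rw [wsum_split board col x0 L (j - r) (j + 1) (x0 - L + 2) (by omega) hje,
        wsum_zero board col x0 L (j - r) (j + 1)
          (fun y hy1 hy2 => contrib_zero board col x0 L y j hnm (by omega) (by omega)),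
        zero3, zero_add]
    · rw [wsum_empty board col x0 L (j + 1) (x0 - L + 2) (by omega),
        wsum_zero board col x0 L (j - r) (x0 - L + 2)
          (fun y hy1 hy2 => contrib_zero board col x0 L y j hnm (by omega) (by omega))]
  · have h1 : wsum board col x0 L (j - r) (x0 - L + 2)
        = wsum board col x0 L (j - r) (j - L + 1) + wsum board col x0 L (j - L + 1) (x0 - L + 2) :=
      wsum_split board col x0 L (j - r) (j - L + 1) (x0 - L + 2) (by omega) (by omega)
    have h2 : wsum board col x0 L (j - r) (j - L + 1) = pvRunCounts board col x0 j r L := by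
      have := runSum' board col x0 L (j - r) j hL hx hjr (by omega) (by omega)
        (fun k hk1 hk2 => hrun k hk1 hk2)
      rw [show j - (j - r) = r from by ring] at this
      rw [show j - L + 1 = j - L + 1 from rfl]
      exact this
    by_cases hje : j + 1 ≤ x0 - L + 2
    · rw [h1, h2, wsum_split board col x0 L (j - L + 1) (j + 1) (x0 - L + 2) (by omega) hje,
        wsum_zero board col x0 L (j - L + 1) (j + 1)
          (fun y hy1 hy2 => contrib_zero board col x0 L y j hnm (by omega) (by omega)),
        zero3, zero_add]
    · rw [h1, h2, wsum_empty board col x0 L (j + 1) (x0 - L + 2) (by omega),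
        wsum_zero board col x0 L (j - L + 1) (x0 - L + 2)
          (fun y hy1 hy2 => contrib_zero board col x0 L y j hnm (by omega) (by omega))]

-- B's diagonal scan continued from position j with pending run r and accumulator t
def bRest (board : List (List String)) (col : String) (length x0 j r : Int) (t : Int × Int × Int) : Int × Int × Int :=
  let inner := (PySem.List.pyRange j (x0+1) 1).foldl
    (fun (st : Int × (Int × Int × Int)) i =>
      if pvCell board i (x0 - i) = col then (st.1 + 1, st.2)
      else (0, add3 st.2 (pvRunCounts board col x0 i st.1 length))) (r, t)
  add3 inner.2 (pvRunCounts board col x0 (x0+1) inner.1 length)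

theorem bDiag_eq_bRest (board : List (List String)) (col : String) (length x0 : Int) (t : Int × Int × Int) :
    pvBDiag board col length x0 t = bRest board col length x0 0 0 t := rfl

theorem bRestSum (board : List (List String)) (col : String) (L x0 : Int)
    (hL : 1 ≤ L) (hx0 : -1 ≤ x0) (hx : x0 ≤ 6) :
    ∀ (n : Nat) (j r : Int) (t : Int × Int × Int), 0 ≤ r → r ≤ j → j ≤ x0 + 1 → x0 + 1 - j = n →
    (∀ k, j - r ≤ k → k < j → pvCell board k (x0 - k) = col) →
    (j - r = 0 ∨ pvCell board (j - r - 1) (x0 - (j - r - 1)) ≠ col) →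
    bRest board col L x0 j r t = t + wsum board col x0 L (j - r) (x0 - L + 2) := by
  intro n
  induction n with
  | zero =>
    intro j r t hr0 hrj hjx hn hrun _
    have hj : j = x0 + 1 := by omega
    subst hj
    simp only [bRest, PySem.List.pyRange_one_eq_nil (le_refl (x0+1)), List.foldl_nil, add3_eq]
    congr 1
    have := runSum' board col x0 L (x0 + 1 - r) (x0 + 1) hL hx (by omega) (by omega) le_rfl
      (fun k hk1 hk2 => hrun k hk1 hk2)
    rw [show x0 + 1 - L + 1 = x0 - L + 2 from by ring,
        show x0 + 1 - (x0 + 1 - r) = r from by ring] at this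
    exact this.symm
  | succ n ih =>
    intro j r t hr0 hrj hjx hn hrun hleft
    have hj : j ≤ x0 := by omega
    simp only [bRest, PySem.List.pyRange_one_cons (show j < x0 + 1 from by omega), List.foldl_cons]
    by_cases hm : pvCell board j (x0 - j) = col
    · rw [if_pos hm]
      have H := ih (j + 1) (r + 1) t (by omega) (by omega) (by omega) (by push_cast at hn ⊢; omega)
        (by
          intro k hk1 hk2
          by_cases hkj : k < j
          · exact hrun k (by omega) hkj
          · rw [show k = j from by omega]; exact hm)
        (by
          rw [show j + 1 - (r + 1) - 1 = j - r - 1 from by ring]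
          rcases hleft with h | h
          · exact Or.inl (by omega)
          · exact Or.inr h)
      simp only [bRest] at H
      rw [H, show j + 1 - (r + 1) = j - r from by ring]
    · rw [if_neg hm]
      have H := ih (j + 1) 0 (add3 t (pvRunCounts board col x0 j r L)) (le_refl 0) (by omega)
        (by omega) (by push_cast at hn ⊢; omega)
        (by intro k hk1 hk2; omega)
        (Or.inr (by rw [show j + 1 - 0 - 1 = j from by ring]; exact hm))
      simp only [bRest] at H
      rw [H, show j + 1 - (0:Int) = j + 1 from by ring, add3_eq,
        run_close board col x0 L j r hL hx hr0 (by omega) hj hm hrun, add_assoc]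

-- A's loop on the anti-diagonal through (0, x0) computes the window sum
theorem aloop (board : List (List String)) (col : String) (L x0 : Int)
    (hL : 1 ≤ L) (hx0 : -1 ≤ x0) (hx : x0 ≤ 6) :
    ∀ (fuel : Nat) (y o s c : Int), 0 ≤ y → x0 - L + 2 - y ≤ fuel →
    pvDrwLoop board col L 1 (-1) y (x0 - y) o s c fuel
      = ((o, s, c) : Int × Int × Int) + wsum board col x0 L y (x0 - L + 2) := by
  intro fuel
  induction fuel with
  | zero =>
    intro y o s c hy hf
    rw [wsum_empty board col x0 L y (x0 - L + 2) (by omega), zero3, add_zero]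
    rfl
  | succ n ih =>
    intro y o s c hy hf
    simp only [pvDrwLoop, mul_one, mul_neg_one, ← sub_eq_add_neg, neg_neg, sub_sub]
    by_cases hg : y ≤ x0 - L + 1
    · rw [if_pos (show (0:Int) ≤ y + (L-1) ∧ y + (L-1) ≤ 7 ∧ 0 ≤ x0 - (y + (L-1)) ∧ x0 - (y + (L-1)) ≤ 7 from by omega)]
      have hlen : (((PySem.List.pyRange 0 L 1).length : Int)) = L := by
        rw [PySem.List.length_pyRange_one]; omega
      have hiff := counter_iff (fun i => pvCell board (y + i) (x0 - (y + i)) = col)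
        (PySem.List.pyRange 0 L 1) L hlen
      have e1 : is_bounded_start board y (x0 - y) L (-1) 1 = pvBlocked board (y + L) (x0 - (y + L)) := by
        rw [isbs_eq]; congr 1; ring
      have e2 : is_bounded_end board y (x0 - y) L (-1) 1 = pvBlocked board (y - 1) (x0 - (y - 1)) := by
        rw [isbe_eq]; congr 1; ring
      have hih : ∀ o' s' c' : Int, pvDrwLoop board col L 1 (-1) (y + 1) (x0 - (y + 1)) o' s' c' n
          = ((o', s', c') : Int × Int × Int) + wsum board col x0 L (y + 1) (x0 - L + 2) := by
        intro o' s' c'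
        exact ih (y + 1) o' s' c' (by omega) (by push_cast at hf ⊢; omega)
      rw [wsum_cons board col x0 L y (x0 - L + 2) (by omega)]
      by_cases hc : List.foldl (fun acc i => if pvCell board (y + i) (x0 - (y + i)) = col then acc + 1 else acc) 0 (PySem.List.pyRange 0 L 1) = L
      · have hall : (PySem.List.pyRange 0 L 1).all (fun i => pvCell board (y + i) (x0 - (y + i)) == col) = true := by
          rw [List.all_eq_true]; intro i hi; simpa using hiff.mp hc i hi
        have hcon : pvContrib board col x0 L y
            = pvBump (0,0,0) ((if pvBlocked board (y - 1) (x0 - (y - 1)) then (1:Int) else 0)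
              + (if pvBlocked board (y + L) (x0 - (y + L)) then (1:Int) else 0)) := by
          rw [pvContrib, if_pos hall]
        rw [if_pos hc]
        by_cases bb : pvBlocked board (y - 1) (x0 - (y - 1)) = true <;>
          by_cases ba : pvBlocked board (y + L) (x0 - (y + L)) = true
        · have hisb : is_bounded board y (x0 - y) L (-1) 1 = "CLOSED" := by
            simp [is_bounded, e1, e2, bb, ba]
          rw [hisb]
          simp only [show ("CLOSED":String) = "SEMIOPEN" ↔ False from by simp,
            show ("CLOSED":String) = "OPEN" ↔ False from by simp, if_false]
          rw [hih, hcon]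
          simp [pvBump, pvBumpN, bb, ba, Prod.ext_iff]
          omega
        · have hisb : is_bounded board y (x0 - y) L (-1) 1 = "SEMIOPEN" := by
            simp [is_bounded, e1, e2, bb, ba]
          rw [hisb, if_pos (rfl : ("SEMIOPEN":String) = "SEMIOPEN")]
          rw [hih, hcon]
          simp [pvBump, pvBumpN, bb, ba, Prod.ext_iff]
          omega
        · have hisb : is_bounded board y (x0 - y) L (-1) 1 = "SEMIOPEN" := by
            simp [is_bounded, e1, e2, bb, ba]
          rw [hisb, if_pos (rfl : ("SEMIOPEN":String) = "SEMIOPEN")]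
          rw [hih, hcon]
          simp [pvBump, pvBumpN, bb, ba, Prod.ext_iff]
          omega
        · have hisb : is_bounded board y (x0 - y) L (-1) 1 = "OPEN" := by
            simp [is_bounded, e1, e2, bb, ba]
          rw [hisb]
          rw [if_neg (by simp : ¬ ("OPEN":String) = "SEMIOPEN"), if_pos (rfl : ("OPEN":String) = "OPEN")]
          rw [hih, hcon]
          simp [pvBump, pvBumpN, bb, ba, Prod.ext_iff]
          omega
      · have hall : ¬ ((PySem.List.pyRange 0 L 1).all (fun i => pvCell board (y + i) (x0 - (y + i)) == col) = true) := by
          rw [List.all_eq_true]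
          intro hforall
          exact hc (hiff.mpr (fun i hi => by simpa using hforall i hi))
        have hcon : pvContrib board col x0 L y = (0, 0, 0) := by
          rw [pvContrib, if_neg hall]
        rw [if_neg hc, hih, hcon, zero3, zero_add]
    · rw [if_neg (by omega),
        wsum_empty board col x0 L y (x0 - L + 2) (by omega), zero3, add_zero]

theorem adiag (board : List (List String)) (col : String) (L x0 : Int)
    (hL : 1 ≤ L) (hx0 : -1 ≤ x0) (hx : x0 ≤ 6) :
    detect_row_is_win board col 0 x0 L 1 (-1) = wsum board col x0 L 0 (x0 - L + 2) := by
  have := aloop board col L x0 hL hx0 hx 9 0 0 0 0 le_rfl (by omega)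
  rw [show x0 - (0:Int) = x0 from by ring] at this
  rw [detect_row_is_win, this, zero3, zero_add]

theorem bdiag (board : List (List String)) (col : String) (L x0 : Int)
    (hL : 1 ≤ L) (hx0 : -1 ≤ x0) (hx : x0 ≤ 6) (t : Int × Int × Int) :
    pvBDiag board col L x0 t = t + detect_row_is_win board col 0 x0 L 1 (-1) := by
  rw [bDiag_eq_bRest, adiag board col L x0 hL hx0 hx,
    bRestSum board col L x0 hL hx0 hx (x0+1).toNat 0 0 t le_rfl le_rfl (by omega) (by omega)
      (by intro k h1 h2; omega) (Or.inl (by ring)),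
    show (0:Int) - 0 = 0 from by ring]

theorem adiag0 (board : List (List String)) (col : String) (L x : Int)
    (hL : L < 1 ∨ 7 < L) (hx : x ≤ 6) :
    detect_row_is_win board col 0 x L 1 (-1) = (0, 0, 0) := by
  rw [detect_row_is_win, pvDrwLoop, if_neg (by intro h; omega)]

theorem AB_eq (board : List (List String)) (col : String) (length : Int) :
    detect_rows_diagonal_right_top_is_win board col length
      = detect_rows_diagonal_right_top_is_win_alt board col length := by
  by_cases hL0 : length < 1 ∨ 7 < length
  · unfold detect_rows_diagonal_right_top_is_win detect_rows_diagonal_right_top_is_win_alt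
    have z : ∀ x : Int, x ≤ 6 → detect_row_is_win board col 0 x length 1 (-1) = (0,0,0) :=
      fun x hx => adiag0 board col length x hL0 hx
    rw [if_pos hL0, show PySem.List.pyRange 1 9 1 = [1,2,3,4,5,6,7,8] from by decide]
    simp only [List.foldl]
    norm_num
    rw [z 6 (by norm_num), z 5 (by norm_num), z 4 (by norm_num), z 3 (by norm_num),
      z 2 (by norm_num), z 1 (by norm_num), z 0 (by norm_num), z (-1) (by norm_num)]
    decide
  · have hL : 1 ≤ length := by omega
    rcases h1 : detect_row_is_win board col 0 6 length 1 (-1) with ⟨a1, b1, c1⟩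
    rcases h2 : detect_row_is_win board col 0 5 length 1 (-1) with ⟨a2, b2, c2⟩
    rcases h3 : detect_row_is_win board col 0 4 length 1 (-1) with ⟨a3, b3, c3⟩
    rcases h4 : detect_row_is_win board col 0 3 length 1 (-1) with ⟨a4, b4, c4⟩
    rcases h5 : detect_row_is_win board col 0 2 length 1 (-1) with ⟨a5, b5, c5⟩
    rcases h6 : detect_row_is_win board col 0 1 length 1 (-1) with ⟨a6, b6, c6⟩
    rcases h7 : detect_row_is_win board col 0 0 length 1 (-1) with ⟨a7, b7, c7⟩
    rcases h8 : detect_row_is_win board col 0 (-1) length 1 (-1) with ⟨a8, b8, c8⟩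
    unfold detect_rows_diagonal_right_top_is_win detect_rows_diagonal_right_top_is_win_alt
    rw [if_neg hL0,
      show PySem.List.pyRange 1 9 1 = [1,2,3,4,5,6,7,8] from by decide,
      show PySem.List.pyRange 6 (-2) (-1) = [6,5,4,3,2,1,0,-1] from by decide]
    simp only [List.foldl]
    rw [bdiag board col length 6 hL (by omega) (by omega),
      bdiag board col length 5 hL (by omega) (by omega),
      bdiag board col length 4 hL (by omega) (by omega),
      bdiag board col length 3 hL (by omega) (by omega),
      bdiag board col length 2 hL (by omega) (by omega),
      bdiag board col length 1 hL (by omega) (by omega),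
      bdiag board col length 0 hL (by omega) (by omega),
      bdiag board col length (-1) hL (by omega) (by omega)]
    norm_num
    rw [h1, h2, h3, h4, h5, h6, h7, h8]
    simp [PySem.List.pyGet?, PySem.List.pyIdx?]
    rw [show PySem.List.pyRange 1 24 3 = [1,4,7,10,13,16,19,22] from by decide,
        show PySem.List.pyRange 0 24 3 = [0,3,6,9,12,15,18,21] from by decide,
        show PySem.List.pyRange 2 24 3 = [2,5,8,11,14,17,20,23] from by decide]
    norm_num [List.foldl]
    simp only [show Int.toNat 2 = 2 from rfl, show Int.toNat 3 = 3 from rfl, show Int.toNat 4 = 4 from rfl,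
      show Int.toNat 5 = 5 from rfl, show Int.toNat 6 = 6 from rfl, show Int.toNat 7 = 7 from rfl,
      show Int.toNat 8 = 8 from rfl, show Int.toNat 9 = 9 from rfl, show Int.toNat 10 = 10 from rfl,
      show Int.toNat 11 = 11 from rfl, show Int.toNat 12 = 12 from rfl, show Int.toNat 13 = 13 from rfl,
      show Int.toNat 14 = 14 from rfl, show Int.toNat 15 = 15 from rfl, show Int.toNat 16 = 16 from rfl,
      show Int.toNat 17 = 17 from rfl, show Int.toNat 18 = 18 from rfl, show Int.toNat 19 = 19 from rfl,
      show Int.toNat 20 = 20 from rfl, show Int.toNat 21 = 21 from rfl, show Int.toNat 22 = 22 from rfl,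
      show Int.toNat 23 = 23 from rfl]
    simp only [List.getElem_cons_zero, List.getElem_cons_succ]
    norm_num

-- ===== VERDICT (by name: the statement is the Claim_ definition above) =====
theorem detect_rows_diagonal_right_top_is_win_spec : Claim_equal_detect_rows_diagonal_right_top_is_win := by
  intro board col length _ _
  unfold Spec_detect_rows_diagonal_right_top_is_win
  exact AB_eq board col length
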